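-- pv_equiv track=rewrite | github.com/GregoryMorse/maxeler | zonepermanent_benchmark.py | permanent_ryser_gray
-- ===== SOURCE A (Python) =====
-- def dosign(parity, x): return -x if parity else x
--
-- def plusminus(parity, base, x): return base - x if parity else base + x
--
-- def prod(x, y): return x * y
--
-- def multiprod(l):
--   import functools
--   return functools.reduce(prod, l)
--
-- def lsbIndex(x): return ((1 + (x ^ (x-1))) >> 1).bit_length() #count of consecutive trailing zero bits
--
-- def nextGrayCode(gcode, i):
--   idx = lsbIndex(i)-1
--   gcode[idx] = 1 - gcode[idx]
--   return idx
--
-- def permanent_ryser_gray(mat): #optimal row-major order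
--   n = len(mat)
--   if n == 0: return 1
--   gcode, rowsums = [0 for _ in range(n)], [mat[i][n-1] - sum(mat[i][j] for j in range(n-1)) for i in range(n)] #[0 for _ in range(n)]
--   tot = multiprod(rowsums)
--   #additions: (1+n)(2^n-1) multiplications: (2^n-1)(n-1)
--   for i in range(1, 1<<(n-1)):
--     idx = nextGrayCode(gcode, i)
--     if gcode[idx]:
--       for j in range(n): rowsums[j] += (mat[j][idx] << 1)
--     else:
--       for j in range(n): rowsums[j] -= (mat[j][idx] << 1)
--     tot = plusminus((i & 1) != 0, tot, multiprod(rowsums))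
--   return dosign(((n-1) & 1) != 0, tot)>>(n-1)
-- ===== SOURCE B (Python) =====
-- def permanent_ryser_gray(mat):
--     # Half-Ryser directly over all 2^(n-1) sign vectors: recompute each row sum
--     # from the mask bits and add with sign (-1)**popcount(mask); no Gray code,
--     # no incremental state.
--     n = len(mat)
--     if n == 0:
--         return 1
--     total = 0
--     for mask in range(1 << (n - 1)):
--         p = 1
--         for row in mat:
--             r = row[n - 1]
--             for j in range(n - 1):
--                 r += row[j] if (mask >> j) & 1 else -row[j]
--             p *= r
--         if bin(mask).count("1") % 2 == 0:
--             total += p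
--         else:
--             total -= p
--     if (n - 1) % 2:
--         total = -total
--     return total >> (n - 1)
-- ===== Notes on version B (the rewrite author's own statement) =====
-- stated objective: alternative
-- what changed: Replaces A's Gray-code walk with incrementally maintained row sums and bit-twiddling (lsb index, in-place flips, shift updates) by a direct loop over all 2^(n-1) sign masks that recomputes each row sum from the mask bits and signs each product by the mask's popcount.
import Mathlib
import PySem

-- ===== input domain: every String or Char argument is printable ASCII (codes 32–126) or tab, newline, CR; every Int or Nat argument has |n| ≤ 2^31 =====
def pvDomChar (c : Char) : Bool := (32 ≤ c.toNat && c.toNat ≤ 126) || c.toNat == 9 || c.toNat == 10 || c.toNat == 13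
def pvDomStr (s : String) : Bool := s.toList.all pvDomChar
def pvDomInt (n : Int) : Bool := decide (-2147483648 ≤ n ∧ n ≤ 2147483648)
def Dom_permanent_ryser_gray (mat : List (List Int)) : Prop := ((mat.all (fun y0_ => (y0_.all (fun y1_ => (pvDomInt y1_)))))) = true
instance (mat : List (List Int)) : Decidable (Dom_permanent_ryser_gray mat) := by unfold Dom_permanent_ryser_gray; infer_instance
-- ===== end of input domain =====

-- B replaces A's Gray-code walk with incremental row-sum updates by a direct loop over all
-- 2^(n-1) masks that recomputes every row sum from the mask bits (objective: alternative).
-- A mutates local lists only; neither version mutates its argument.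

-- ===== PORT A =====
def dosign (parity : Bool) (x : Int) : Int := if parity then -x else x

def plusminus (parity : Bool) (base : Int) (x : Int) : Int := if parity then base - x else base + x

def prodPy (x y : Int) : Int := x * y

-- functools.reduce(prod, l); Python raises TypeError on [], which is unreachable here (l has length n ≥ 1)
def multiprod (l : List Int) : Int :=
  match l with
  | [] => 0
  | h :: t => t.foldl prodPy h

-- ((1 + (x ^ (x-1))) >> 1).bit_length()
def lsbIndex (x : Int) : Int := (PySem.Int.bitLength ((1 + PySem.Int.bxor x (x - 1)) >>> (1 : Nat)) : Int)

-- Python mutates gcode[idx] in place and returns idx; rendered as returning the updated list with idx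
def nextGrayCode (gcode : List Int) (i : Int) : List Int × Int :=
  let idx := lsbIndex i - 1
  (PySem.List.pySetD gcode idx (1 - PySem.List.pyGetD gcode idx 0), idx)

-- the body of A's 'for i in range(1, 1 << (n-1))' loop, on state (gcode, rowsums, tot);
-- 'for j in range(n): rowsums[j] ±= mat[j][idx] << 1' updates each entry independently,
-- so it is rendered as a map over j
def ryserStep (mat : List (List Int)) (n : Nat) (st : List Int × List Int × Int) (i : Int) :
    List Int × List Int × Int :=
  let gr := nextGrayCode st.1 i
  let gcode := gr.1
  let idx := gr.2
  let rowsums :=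
    if PySem.List.pyGetD gcode idx 0 ≠ 0 then
      (PySem.List.pyRange 0 (n : Int)).map (fun j =>
        PySem.List.pyGetD st.2.1 j 0 + (PySem.List.pyGetD (PySem.List.pyGetD mat j []) idx 0 <<< (1 : Nat)))
    else
      (PySem.List.pyRange 0 (n : Int)).map (fun j =>
        PySem.List.pyGetD st.2.1 j 0 - (PySem.List.pyGetD (PySem.List.pyGetD mat j []) idx 0 <<< (1 : Nat)))
  (gcode, rowsums, plusminus (PySem.Int.band i 1 ≠ 0) st.2.2 (multiprod rowsums))

def permanent_ryser_gray (mat : List (List Int)) : Int :=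
  let n := mat.length
  if n = 0 then 1 else
    let gcode : List Int := (PySem.List.pyRange 0 (n : Int)).map (fun _ => 0)
    let rowsums : List Int := (PySem.List.pyRange 0 (n : Int)).map (fun i =>
      PySem.List.pyGetD (PySem.List.pyGetD mat i []) ((n : Int) - 1) 0 -
        ((PySem.List.pyRange 0 ((n : Int) - 1)).map (fun j =>
          PySem.List.pyGetD (PySem.List.pyGetD mat i []) j 0)).sum)
    let tot := multiprod rowsums
    let st := (PySem.List.pyRange 1 ((1 : Int) <<< (n - 1))).foldl (ryserStep mat n) (gcode, rowsums, tot)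
    dosign (PySem.Int.band ((n : Int) - 1) 1 ≠ 0) st.2.2 >>> (n - 1)

-- ===== PORT B =====
-- row sum for one mask: r = row[n-1]; for j in range(n-1): r += row[j] if (mask>>j)&1 else -row[j]
def altRowSum (n : Nat) (mask : Int) (row : List Int) : Int :=
  (PySem.List.pyRange 0 ((n : Int) - 1)).foldl (fun r j =>
    r + (if PySem.Int.band (mask >>> j) 1 ≠ 0 then PySem.List.pyGetD row j 0
         else -PySem.List.pyGetD row j 0))
    (PySem.List.pyGetD row ((n : Int) - 1) 0)

def permanent_ryser_gray_alt (mat : List (List Int)) : Int :=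
  let n := mat.length
  if n = 0 then 1 else
    let total := (PySem.List.pyRange 0 ((1 : Int) <<< (n - 1))).foldl (fun total mask =>
      let p := mat.foldl (fun p row => p * altRowSum n mask row) 1
      -- bin(mask).count("1") is the number of set bits of mask (mask ≥ 0 here)
      if PySem.Int.bitCount mask % 2 = 0 then total + p else total - p) 0
    let total := if (n - 1) % 2 = 1 then -total else total
    total >>> (n - 1)

-- ===== PRECONDITION & SPEC =====
-- Pre_ excludes matrices with a row shorter than the number of rows, on which Python A
-- (and Python B) raise IndexError reading mat[i][n-1] / mat[i][j].
def Pre_permanent_ryser_gray (mat : List (List Int)) : Prop :=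
  ∀ row ∈ mat, mat.length ≤ row.length
instance (mat : List (List Int)) : Decidable (Pre_permanent_ryser_gray mat) := by
  unfold Pre_permanent_ryser_gray; infer_instance

def pvWitness_permanent_ryser_gray : List (List Int) := [[1, 2], [3, 4]]

def Spec_permanent_ryser_gray (mat : List (List Int)) (out : Int) : Prop := out = permanent_ryser_gray_alt mat
instance (mat : List (List Int)) (out : Int) : Decidable (Spec_permanent_ryser_gray mat out) := by
  unfold Spec_permanent_ryser_gray; infer_instance

-- ===== CLAIM (what is proved, stated in full; the proofs are below) =====
def Claim_equal_permanent_ryser_gray : Prop := ∀ (mat : List (List Int)), Dom_permanent_ryser_gray mat → Pre_permanent_ryser_gray mat → Spec_permanent_ryser_gray mat (permanent_ryser_gray mat)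

-- ===== LEMMAS AND PROOFS =====

def tz (m : Nat) : Nat :=
  if m = 0 ∨ m % 2 = 1 then 0 else tz (m / 2) + 1
termination_by m
decreasing_by omega

theorem tz_odd (m : Nat) (h : m % 2 = 1) : tz m = 0 := by rw [tz]; simp [h]
theorem tz_even (m : Nat) (h2 : 2 ≤ m) (h : m % 2 = 0) : tz m = tz (m / 2) + 1 := by
  rw [tz]; simp [show ¬(m = 0 ∨ m % 2 = 1) by omega]

theorem testBit_pred (m : Nat) (hm : 1 ≤ m) :
    ∀ j, (m - 1).testBit j = (if j ≤ tz m then !(m.testBit j) else m.testBit j) := by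
  induction m using Nat.strong_induction_on with
  | _ m ih =>
    intro j
    rcases Nat.mod_two_eq_zero_or_one m with he | ho
    · have h2 : 2 ≤ m := by omega
      rw [tz_even m h2 he]
      cases j with
      | zero =>
        rw [Nat.testBit_zero, Nat.testBit_zero]
        simp only [Nat.zero_le, if_pos]
        have : (m - 1) % 2 = 1 := by omega
        simp [this, he]
      | succ j =>
        have e1 : (m - 1) / 2 = m / 2 - 1 := by omega
        rw [Nat.testBit_succ, Nat.testBit_succ, e1, ih (m / 2) (by omega) (by omega) j]
        by_cases hj : j ≤ tz (m / 2)
        · simp [hj, show j + 1 ≤ tz (m / 2) + 1 by omega]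
        · simp [hj, show ¬(j + 1 ≤ tz (m / 2) + 1) by omega]
    · rw [tz_odd m ho]
      cases j with
      | zero =>
        rw [Nat.testBit_zero, Nat.testBit_zero]
        simp only [Nat.le_refl, if_pos]
        have : (m - 1) % 2 = 0 := by omega
        simp [this, ho]
      | succ j =>
        have e1 : (m - 1) / 2 = m / 2 := by omega
        rw [Nat.testBit_succ, Nat.testBit_succ, e1]
        simp [show ¬(j + 1 ≤ 0) by omega]

theorem xor_pred (m : Nat) (hm : 1 ≤ m) : m ^^^ (m - 1) = 2 ^ (tz m + 1) - 1 := by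
  apply Nat.eq_of_testBit_eq
  intro j
  rw [Nat.testBit_xor, testBit_pred m hm j, Nat.testBit_two_pow_sub_one]
  by_cases hj : j ≤ tz m
  · simp [hj, show j < tz m + 1 by omega]
  · simp [hj, show ¬(j < tz m + 1) by omega]

theorem two_pow_tz_le (m : Nat) (hm : 1 ≤ m) : 2 ^ tz m ≤ m := by
  induction m using Nat.strong_induction_on with
  | _ m ih =>
    rcases Nat.mod_two_eq_zero_or_one m with he | ho
    · have h2 : 2 ≤ m := by omega
      rw [tz_even m h2 he, pow_succ]
      have := ih (m / 2) (by omega) (by omega)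
      omega
    · rw [tz_odd m ho]; omega

theorem tz_lt (m k : Nat) (h1 : 1 ≤ m) (h2 : m < 2 ^ k) : tz m < k := by
  have := two_pow_tz_le m h1
  by_contra h
  have : 2 ^ k ≤ 2 ^ tz m := Nat.pow_le_pow_right (by omega) (by omega)
  omega

theorem bitLength_two_pow (t : Nat) : PySem.Int.bitLength (((2 ^ t : Nat) : Int)) = t + 1 := by
  induction t with
  | zero => decide
  | succ t ih =>
    rw [PySem.Int.bitLength_natCast (by positivity)]
    have : 2 ^ (t + 1) / 2 = 2 ^ t := by rw [pow_succ]; omega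
    rw [this, ih]

theorem lsbIndex_natCast (m : Nat) (hm : 1 ≤ m) : lsbIndex (m : Int) = (tz m : Int) + 1 := by
  unfold lsbIndex
  have e1 : ((m : Int) - 1) = ((m - 1 : Nat) : Int) := by omega
  rw [e1, PySem.Int.bxor_natCast, xor_pred m hm]
  have e2 : (1 + ((2 ^ (tz m + 1) - 1 : Nat) : Int)) = ((2 ^ (tz m + 1) : Nat) : Int) := by
    have : 1 ≤ 2 ^ (tz m + 1) := Nat.one_le_two_pow
    push_cast [this]; ring
  rw [e2]
  have e3 : (((2 ^ (tz m + 1) : Nat) : Int) >>> (1 : Nat)) = ((2 ^ tz m : Nat) : Int) := by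
    have h4 : ((2 ^ (tz m + 1) : Nat) : Int) >>> (1 : Nat) = (((2 ^ (tz m + 1)) >>> 1 : Nat) : Int) := by
      simp
    rw [h4]
    congr 1
    rw [Nat.shiftRight_one, pow_succ]
    omega
  rw [e3, bitLength_two_pow]
  push_cast; ring

def gmask (m : Nat) : Nat := m ^^^ (m >>> 1)

theorem gmask_testBit (m j : Nat) : (gmask m).testBit j = (m.testBit j ^^ m.testBit (j + 1)) := by
  unfold gmask
  rw [Nat.testBit_xor, Nat.testBit_shiftRight]
  congr 2
  omega

theorem gmask_lt (m k : Nat) (h : m < 2 ^ k) : gmask m < 2 ^ k := by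
  exact Nat.xor_lt_two_pow h (by have := Nat.shiftRight_le m 1; omega)

theorem gmask_succ_testBit (m j : Nat) (hm : 1 ≤ m) :
    (gmask m).testBit j = (if j = tz m then !((gmask (m - 1)).testBit j) else (gmask (m - 1)).testBit j) := by
  rw [gmask_testBit, gmask_testBit, testBit_pred m hm j, testBit_pred m hm (j + 1)]
  by_cases h1 : j = tz m
  · simp only [h1, show tz m ≤ tz m by omega, if_pos, show ¬(tz m + 1 ≤ tz m) by omega]
    cases m.testBit (tz m) <;> cases m.testBit (tz m + 1) <;> rfl
  · by_cases h2 : j ≤ tz m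
    · simp only [if_pos h2, show j + 1 ≤ tz m by omega, if_pos, if_neg h1]
      cases m.testBit j <;> cases m.testBit (j + 1) <;> rfl
    · simp only [if_neg h2, show ¬(j + 1 ≤ tz m) by omega, if_neg h1]
      simp

theorem gmask_div2 (m : Nat) : gmask m / 2 = gmask (m / 2) := by
  apply Nat.eq_of_testBit_eq
  intro j
  have h1 : (gmask m / 2).testBit j = (gmask m).testBit (j + 1) := (Nat.testBit_succ _ _).symm
  rw [h1, gmask_testBit, gmask_testBit, Nat.testBit_succ, Nat.testBit_succ, Nat.testBit_succ]

theorem gmask_mod2 (m : Nat) : gmask m % 2 = (m % 2 + m / 2 % 2) % 2 := by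
  have h1 := gmask_testBit m 0
  rw [Nat.testBit_zero, Nat.testBit_succ, Nat.testBit_zero, Nat.testBit_zero] at h1
  have hg := Nat.mod_two_eq_zero_or_one (gmask m)
  have hm := Nat.mod_two_eq_zero_or_one m
  have hd := Nat.mod_two_eq_zero_or_one (m / 2)
  rcases hm with hm | hm <;> rcases hd with hd | hd <;> simp [hm, hd] at h1 <;> omega

theorem gmask_inj_aux : ∀ n a b : Nat, a + b ≤ n → gmask a = gmask b → a = b := by
  intro n
  induction n with
  | zero => intro a b h _; omega
  | succ n ih =>
    intro a b hab h
    by_cases h0 : a = 0 ∧ b = 0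
    · omega
    · have hdiv : a / 2 = b / 2 := by
        apply ih (a / 2) (b / 2) (by omega)
        rw [← gmask_div2, ← gmask_div2, h]
      have hp : gmask a % 2 = gmask b % 2 := by rw [h]
      rw [gmask_mod2, gmask_mod2, hdiv] at hp
      omega

theorem gmask_inj (a b : Nat) (h : gmask a = gmask b) : a = b :=
  gmask_inj_aux (a + b) a b (Nat.le_refl _) h

theorem gmask_eq_zero (m : Nat) (h : gmask m = 0) : m = 0 :=
  gmask_inj m 0 h

theorem bitCount_gmask_parity (m : Nat) : PySem.Int.bitCount ((gmask m : Nat) : Int) % 2 = m % 2 := by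
  induction m using Nat.strong_induction_on with
  | _ m ih =>
    by_cases h0 : m = 0
    · subst h0; decide
    · have hg : 0 < gmask m := by
        rcases Nat.eq_zero_or_pos (gmask m) with h | h
        · exact absurd (gmask_eq_zero m h) h0
        · exact h
      rw [PySem.Int.bitCount_natCast hg, gmask_div2]
      have := ih (m / 2) (by omega)
      have := gmask_mod2 m
      omega

-- number of trailing zero bits
-- row sum of the half-Ryser term selected by mask m
def Rrow (row : List Int) (n : Nat) (m : Nat) : Int :=
  row.getD (n - 1) 0 + ∑ j ∈ Finset.range (n - 1), (if m.testBit j then row.getD j 0 else -row.getD j 0)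

def Pprod (mat : List (List Int)) (n : Nat) (m : Nat) : Int := (mat.map (fun row => Rrow row n m)).prod

-- the signed term B adds for mask m
def term (mat : List (List Int)) (n : Nat) (m : Nat) : Int :=
  if PySem.Int.bitCount (m : Int) % 2 = 0 then Pprod mat n m else -Pprod mat n m

-- the signed term A adds at loop index i
def termA (mat : List (List Int)) (n : Nat) (i : Nat) : Int :=
  if i % 2 = 0 then Pprod mat n (gmask i) else -Pprod mat n (gmask i)

def gcodeL (n m : Nat) : List Int := (List.range n).map (fun j => if m.testBit j then 1 else 0)

def rowsL (mat : List (List Int)) (n m : Nat) : List Int := mat.map (fun row => Rrow row n m)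

theorem sum_range_list (n : Nat) (f : Nat → Int) :
    ((List.range n).map f).sum = ∑ i ∈ Finset.range n, f i := rfl


theorem band_shift_ne (m j : Nat) :
    (PySem.Int.band (((m : Nat) : Int) >>> ((j : Nat) : Int)) 1 ≠ 0) ↔ m.testBit j := by
  have h1 : ((m : Int) >>> ((j : Nat) : Int)) = (((m >>> j : Nat) : Nat) : Int) := by simp
  rw [h1, PySem.Int.band_one]
  have h2 : PySem.Int.mod ((m >>> j : Nat) : Int) 2 = (((m >>> j) % 2 : Nat) : Int) := by
    exact_mod_cast PySem.Int.mod_natCast (m >>> j) 2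
  rw [h2, Nat.testBit]
  constructor
  · intro h
    have : (m >>> j) % 2 = 1 := by omega
    simp [this]
  · intro h
    simp at h
    omega

theorem altRowSum_eq (n : Nat) (hn : 1 ≤ n) (m : Nat) (row : List Int) :
    altRowSum n ((m : Nat) : Int) row = Rrow row n m := by
  unfold altRowSum Rrow
  have e1 : ((n : Int) - 1) = (((n - 1 : Nat) : Nat) : Int) := by omega
  rw [e1, PySem.List.pyRange_zero_nat, List.foldl_map]
  have e2 : ∀ (r : Int) (j : Nat), j < n - 1 →
      (r + (if PySem.Int.band (((m : Nat) : Int) >>> ((j : Nat) : Int)) 1 ≠ 0 then PySem.List.pyGetD row ((j : Nat) : Int) 0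
         else -PySem.List.pyGetD row ((j : Nat) : Int) 0)) =
      r + (if m.testBit j then row.getD j 0 else -row.getD j 0) := by
    intro r j _
    congr 1
    by_cases h : m.testBit j
    · rw [if_pos ((band_shift_ne m j).mpr h), if_pos h]; simp
    · rw [if_neg (fun hc => h ((band_shift_ne m j).mp hc)), if_neg h]; simp
  rw [PySem.List.foldl_congr_mem _ _
    (fun r j => r + (if m.testBit j then row.getD j 0 else -row.getD j 0)) _
    (fun r j hj => e2 r j (by simpa using (List.mem_range.mp hj)))]
  rw [PySem.List.foldl_add, sum_range_list]
  simp

theorem shiftLeft_one_eq (n : Nat) : ((1 : Int) <<< (n - 1)) = ((2 ^ (n - 1) : Nat) : Int) := by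
  rw [Int.shiftLeft_eq, one_mul]
  push_cast
  ring

theorem B_eq (mat : List (List Int)) (hn : mat.length ≠ 0) :
    permanent_ryser_gray_alt mat =
      (if (mat.length - 1) % 2 = 1 then -(∑ m ∈ Finset.range (2 ^ (mat.length - 1)), term mat mat.length m)
       else ∑ m ∈ Finset.range (2 ^ (mat.length - 1)), term mat mat.length m) >>> (mat.length - 1) := by
  unfold permanent_ryser_gray_alt
  rw [if_neg hn]
  rw [shiftLeft_one_eq, PySem.List.pyRange_zero_nat, List.foldl_map]
  rw [PySem.List.foldl_congr_mem _ _ (fun total m => total + term mat mat.length m) _ ?_]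
  · rw [PySem.List.foldl_add, sum_range_list]
    simp
  · intro acc m _
    have hp : mat.foldl (fun p row => p * altRowSum mat.length ((m : Nat) : Int) row) 1 =
        Pprod mat mat.length m := by
      have h1 : (mat.map (fun row => altRowSum mat.length ((m : Nat) : Int) row)) =
          mat.map (fun row => Rrow row mat.length m) := by
        apply List.map_congr_left
        intro row _
        exact altRowSum_eq mat.length (by omega) m row
      rw [Pprod, ← h1, List.prod_eq_foldl, List.foldl_map]
    rw [hp]
    unfold term
    split_ifs with h
    · simp [h]
    · simp [h, sub_eq_add_neg]

theorem termA_eq_term (mat : List (List Int)) (n : Nat) (i : Nat) :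
    termA mat n i = term mat n (gmask i) := by
  unfold termA term
  have h := bitCount_gmask_parity i
  by_cases h2 : i % 2 = 0
  · rw [if_pos h2, if_pos (by omega)]
  · rw [if_neg h2, if_neg (by omega)]

theorem sum_reindex (mat : List (List Int)) (n N : Nat) (hN : N = 2 ^ (n - 1)) :
    ∑ i ∈ Finset.range N, termA mat n i = ∑ m ∈ Finset.range N, term mat n m := by
  apply Finset.sum_bij (fun (a : Nat) (_ : a ∈ Finset.range N) => gmask a)
  · intro a ha
    rw [Finset.mem_range] at *
    exact hN ▸ gmask_lt a (n - 1) (hN ▸ ha)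
  · intro a₁ _ a₂ _ h
    exact gmask_inj a₁ a₂ h
  · intro b hb
    rw [Finset.mem_range] at hb
    have hcard : (Finset.range N).card ≤ ((Finset.range N)).card := le_refl _
    have := Finset.surj_on_of_inj_on_of_card_le (s := Finset.range N) (t := Finset.range N)
      (fun a _ => gmask a)
      (fun a ha => by rw [Finset.mem_range] at *; exact hN ▸ gmask_lt a (n - 1) (hN ▸ ha))
      (fun a₁ a₂ _ _ h => gmask_inj a₁ a₂ h) (le_refl _) b (Finset.mem_range.mpr hb)
    obtain ⟨a, ha, hab⟩ := this
    exact ⟨a, ha, hab.symm⟩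
  · intro a _
    exact termA_eq_term mat n a

theorem multiprod_rowsL (mat : List (List Int)) (hn : mat ≠ []) (n m : Nat) :
    multiprod (rowsL mat n m) = Pprod mat n m := by
  unfold rowsL Pprod
  match mat, hn with
  | r :: t, _ =>
    show multiprod (Rrow r n m :: t.map (fun row => Rrow row n m)) = _
    show (t.map (fun row => Rrow row n m)).foldl prodPy (Rrow r n m) = _
    rw [List.map_cons, List.prod_cons]
    have : ∀ (l : List Int) (a : Int), l.foldl prodPy a = a * l.prod := by
      intro l
      induction l with
      | nil => simp
      | cons h t ih =>
        intro a
        rw [List.foldl_cons, ih (prodPy a h), List.prod_cons]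
        show a * h * t.prod = a * (h * t.prod)
        ring
    rw [this]

theorem pySetD_map_range (f : Nat → Int) (n t : Nat) (ht : t < n) (v : Int) :
    PySem.List.pySetD ((List.range n).map f) ((t : Nat) : Int) v =
      (List.range n).map (fun j => if j = t then v else f j) := by
  unfold PySem.List.pySetD PySem.List.pySet?
  have hidx : PySem.List.pyIdx? ((List.range n).map f).length ((t : Nat) : Int) = some t := by
    simp [PySem.List.pyIdx?]
    omega
  rw [hidx]
  simp only [Option.map_some, Option.getD_some]
  apply List.ext_getElem
  · simp
  · intro i h1 h2
    rw [List.getElem_set]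
    simp at h1 h2 ⊢
    by_cases hit : t = i
    · simp [hit]
    · simp [hit, show ¬(i = t) by omega]

theorem map_range_getD (mat : List (List Int)) (F : List Int → Int) :
    (List.range mat.length).map (fun i => F (mat.getD i [])) = mat.map F := by
  apply List.ext_getElem
  · simp
  · intro i h1 h2
    simp at h1 h2 ⊢
    rw [show mat[i]?.getD [] = mat[i] by simp [List.getElem?_eq_getElem h1]]

theorem gcodeL_getD (n g t : Nat) (ht : t < n) :
    PySem.List.pyGetD (gcodeL n g) ((t : Nat) : Int) 0 = (if g.testBit t then 1 else 0) := by
  rw [PySem.List.pyGetD_natCast]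
  unfold gcodeL
  exact PySem.List.getD_map_range _ n t 0 ht

theorem rowsL_getD (mat : List (List Int)) (n g j : Nat) (hj : j < mat.length) :
    PySem.List.pyGetD (rowsL mat n g) ((j : Nat) : Int) 0 = Rrow (mat.getD j []) n g := by
  rw [PySem.List.pyGetD_natCast]
  unfold rowsL
  rw [← map_range_getD mat (fun row => Rrow row n g)]
  exact PySem.List.getD_map_range _ mat.length j 0 hj

theorem Rrow_flip (row : List Int) (n : Nat) (g g' t : Nat) (ht : t < n - 1)
    (hbit : ∀ j, g'.testBit j = (if j = t then !(g.testBit j) else g.testBit j)) :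
    Rrow row n g' = (if g'.testBit t then Rrow row n g + 2 * row.getD t 0
                     else Rrow row n g - 2 * row.getD t 0) := by
  unfold Rrow
  have hmem : t ∈ Finset.range (n - 1) := Finset.mem_range.mpr ht
  rw [← Finset.sum_erase_add _ _ hmem, ← Finset.sum_erase_add _ (fun j => if g.testBit j then row.getD j 0 else -row.getD j 0) hmem]
  have hsame : ∑ x ∈ (Finset.range (n - 1)).erase t, (if g'.testBit x then row.getD x 0 else -row.getD x 0) =
      ∑ x ∈ (Finset.range (n - 1)).erase t, (if g.testBit x then row.getD x 0 else -row.getD x 0) := by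
    apply Finset.sum_congr rfl
    intro x hx
    have hxt : x ≠ t := (Finset.mem_erase.mp hx).1
    rw [hbit x, if_neg hxt]
  rw [hsame]
  have hbt : g'.testBit t = !(g.testBit t) := by rw [hbit t, if_pos rfl]
  cases hg : g.testBit t <;> rw [hg] at hbt <;> simp [hbt] <;> ring

theorem band_one_ne (k : Nat) : ((PySem.Int.band ((k : Nat) : Int) 1 ≠ 0)) ↔ k % 2 = 1 := by
  rw [PySem.Int.band_one]
  have h2 : PySem.Int.mod ((k : Nat) : Int) 2 = ((k % 2 : Nat) : Int) := by
    exact_mod_cast PySem.Int.mod_natCast k 2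
  rw [h2]
  omega

theorem step_eval (mat : List (List Int)) (n : Nat) (hn : n = mat.length) (h1 : 1 ≤ n)
    (k : Nat) (hk : 1 ≤ k) (hk2 : k < 2 ^ (n - 1)) :
    ryserStep mat n (gcodeL n (gmask (k - 1)), rowsL mat n (gmask (k - 1)),
        ∑ i ∈ Finset.range k, termA mat n i) ((k : Nat) : Int) =
      (gcodeL n (gmask k), rowsL mat n (gmask k), ∑ i ∈ Finset.range (k + 1), termA mat n i) := by
  have ht : tz k < n - 1 := tz_lt k (n - 1) hk hk2
  have htn : tz k < n := by omega
  have hbit := fun j => gmask_succ_testBit k j hk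
  have hmatne : mat ≠ [] := by
    intro h; rw [h] at hn; simp at hn; omega
  unfold ryserStep nextGrayCode
  have hidx : lsbIndex ((k : Nat) : Int) - 1 = ((tz k : Nat) : Int) := by
    rw [lsbIndex_natCast k hk]; ring
  simp only [hidx]
  have hget : PySem.List.pyGetD (gcodeL n (gmask (k - 1))) ((tz k : Nat) : Int) 0 =
      (if (gmask (k - 1)).testBit (tz k) then 1 else 0) := gcodeL_getD n _ _ htn
  have hgcode : PySem.List.pySetD (gcodeL n (gmask (k - 1))) ((tz k : Nat) : Int)
      (1 - PySem.List.pyGetD (gcodeL n (gmask (k - 1))) ((tz k : Nat) : Int) 0) =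
      gcodeL n (gmask k) := by
    rw [hget]
    unfold gcodeL
    rw [pySetD_map_range _ n (tz k) htn]
    apply List.map_congr_left
    intro j _
    rw [hbit j]
    by_cases hj : j = tz k
    · subst hj
      cases hgb : (gmask (k - 1)).testBit (tz k) <;> simp
    · simp [hj]
  rw [hgcode]
  have hget2 : PySem.List.pyGetD (gcodeL n (gmask k)) ((tz k : Nat) : Int) 0 =
      (if (gmask k).testBit (tz k) then 1 else 0) := gcodeL_getD n _ _ htn
  have hrowcore : ∀ (j : Nat), j < mat.length →
      Rrow (mat.getD j []) n (gmask k) =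
        (if (gmask k).testBit (tz k) then
          Rrow (mat.getD j []) n (gmask (k - 1)) + 2 * (mat.getD j []).getD (tz k) 0
         else Rrow (mat.getD j []) n (gmask (k - 1)) - 2 * (mat.getD j []).getD (tz k) 0) := by
    intro j _
    subst hn
    exact Rrow_flip (mat.getD j []) mat.length (gmask (k - 1)) (gmask k) (tz k) ht hbit
  have hsum : plusminus (PySem.Int.band ((k : Nat) : Int) 1 ≠ 0)
        (∑ i ∈ Finset.range k, termA mat n i) (multiprod (rowsL mat n (gmask k))) =
      ∑ i ∈ Finset.range (k + 1), termA mat n i := by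
    rw [multiprod_rowsL mat hmatne, Finset.sum_range_succ]
    unfold plusminus termA
    have hb := band_one_ne k
    by_cases hp : k % 2 = 0
    · rw [decide_eq_false (fun h => by have := hb.mp h; omega)]
      simp [hp]
    · rw [decide_eq_true (hb.mpr (by omega))]
      simp [hp, sub_eq_add_neg]
  by_cases hbt : (gmask k).testBit (tz k)
  · rw [if_pos (show PySem.List.pyGetD (gcodeL n (gmask k)) ((tz k : Nat) : Int) 0 ≠ 0 by
      rw [hget2, if_pos hbt]; decide)]
    have hrows : ((PySem.List.pyRange 0 (n : Int)).map (fun j =>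
        PySem.List.pyGetD (rowsL mat n (gmask (k - 1))) j 0 +
          (PySem.List.pyGetD (PySem.List.pyGetD mat j []) ((tz k : Nat) : Int) 0 <<< (1 : Nat)))) =
        rowsL mat n (gmask k) := by
      rw [PySem.List.pyRange_zero_nat, List.map_map]
      have hgoal : rowsL mat n (gmask k) = (List.range n).map
          (fun i => Rrow (mat.getD i []) n (gmask k)) := by
        subst hn
        exact (map_range_getD _ _).symm
      rw [hgoal]
      apply List.map_congr_left
      intro j hj
      have hjlt : j < mat.length := by rw [← hn]; exact List.mem_range.mp hj
      simp only [Function.comp]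
      rw [rowsL_getD mat _ _ j hjlt]
      rw [show PySem.List.pyGetD mat ((j : Nat) : Int) [] = mat.getD j [] from PySem.List.pyGetD_natCast mat j []]
      rw [show PySem.List.pyGetD (mat.getD j []) ((tz k : Nat) : Int) 0 = (mat.getD j []).getD (tz k) 0 from
        PySem.List.pyGetD_natCast _ _ _]
      rw [hrowcore j hjlt, if_pos hbt, Int.shiftLeft_eq]
      ring
    rw [hrows, hsum]
  · rw [if_neg (show ¬(PySem.List.pyGetD (gcodeL n (gmask k)) ((tz k : Nat) : Int) 0 ≠ 0) by
      rw [hget2, if_neg hbt]; decide)]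
    have hrows : ((PySem.List.pyRange 0 (n : Int)).map (fun j =>
        PySem.List.pyGetD (rowsL mat n (gmask (k - 1))) j 0 -
          (PySem.List.pyGetD (PySem.List.pyGetD mat j []) ((tz k : Nat) : Int) 0 <<< (1 : Nat)))) =
        rowsL mat n (gmask k) := by
      rw [PySem.List.pyRange_zero_nat, List.map_map]
      have hgoal : rowsL mat n (gmask k) = (List.range n).map
          (fun i => Rrow (mat.getD i []) n (gmask k)) := by
        subst hn
        exact (map_range_getD _ _).symm
      rw [hgoal]
      apply List.map_congr_left
      intro j hj
      have hjlt : j < mat.length := by rw [← hn]; exact List.mem_range.mp hj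
      simp only [Function.comp]
      rw [rowsL_getD mat _ _ j hjlt]
      rw [show PySem.List.pyGetD mat ((j : Nat) : Int) [] = mat.getD j [] from PySem.List.pyGetD_natCast mat j []]
      rw [show PySem.List.pyGetD (mat.getD j []) ((tz k : Nat) : Int) 0 = (mat.getD j []).getD (tz k) 0 from
        PySem.List.pyGetD_natCast _ _ _]
      rw [hrowcore j hjlt, if_neg hbt, Int.shiftLeft_eq]
      ring
    rw [hrows, hsum]

theorem A_loop (mat : List (List Int)) (n : Nat) (hn : n = mat.length) (h1 : 1 ≤ n) :
    ∀ k : Nat, 1 ≤ k → k ≤ 2 ^ (n - 1) →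
      (PySem.List.pyRange 1 ((k : Nat) : Int)).foldl (ryserStep mat n)
        (gcodeL n 0, rowsL mat n 0, Pprod mat n 0) =
      (gcodeL n (gmask (k - 1)), rowsL mat n (gmask (k - 1)), ∑ i ∈ Finset.range k, termA mat n i) := by
  intro k
  induction k with
  | zero => omega
  | succ k ih =>
    intro _ hk2
    by_cases hk0 : k = 0
    · subst hk0
      rw [show (((0 + 1 : Nat) : Nat) : Int) = 1 by norm_num, PySem.List.pyRange_one_eq_nil (le_refl 1)]
      rw [List.foldl_nil]
      have hg0 : gmask 0 = 0 := rfl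
      simp [hg0, termA]
    · have hk1 : 1 ≤ k := by omega
      have hc : ((k + 1 : Nat) : Int) = ((k : Nat) : Int) + 1 := by push_cast; ring
      rw [hc, PySem.List.pyRange_one_succ_right (by exact_mod_cast hk1), List.foldl_append,
        ih hk1 (by omega), List.foldl_cons, List.foldl_nil,
        step_eval mat n hn h1 k hk1 (by omega)]
      simp

theorem A_eq (mat : List (List Int)) (hne : mat.length ≠ 0) :
    permanent_ryser_gray mat =
      dosign (PySem.Int.band ((mat.length : Int) - 1) 1 ≠ 0)
        (∑ i ∈ Finset.range (2 ^ (mat.length - 1)), termA mat mat.length i) >>> (mat.length - 1) := by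
  have h1 : 1 ≤ mat.length := by omega
  unfold permanent_ryser_gray
  rw [if_neg hne]
  simp only []
  have hgc : (PySem.List.pyRange 0 (mat.length : Int)).map (fun _ => (0 : Int)) =
      gcodeL mat.length 0 := by
    rw [PySem.List.pyRange_zero_nat, List.map_map]
    unfold gcodeL
    apply List.map_congr_left
    intro j _
    simp [Nat.zero_testBit]
  have hrs : (PySem.List.pyRange 0 (mat.length : Int)).map (fun i =>
      PySem.List.pyGetD (PySem.List.pyGetD mat i []) ((mat.length : Int) - 1) 0 -
        ((PySem.List.pyRange 0 ((mat.length : Int) - 1)).map (fun j =>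
          PySem.List.pyGetD (PySem.List.pyGetD mat i []) j 0)).sum) =
      rowsL mat mat.length 0 := by
    rw [PySem.List.pyRange_zero_nat, List.map_map]
    rw [show rowsL mat mat.length 0 = (List.range mat.length).map
        (fun i => Rrow (mat.getD i []) mat.length 0) from (map_range_getD _ _).symm]
    apply List.map_congr_left
    intro i _
    simp only [Function.comp]
    rw [show PySem.List.pyGetD mat ((i : Nat) : Int) [] = mat.getD i [] from
      PySem.List.pyGetD_natCast mat i []]
    have e1 : ((mat.length : Int) - 1) = (((mat.length - 1 : Nat) : Nat) : Int) := by omega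
    rw [e1, PySem.List.pyGetD_natCast, PySem.List.pyRange_zero_nat, List.map_map]
    have e2 : ((List.range (mat.length - 1)).map
        ((fun j => PySem.List.pyGetD (mat.getD i []) j 0) ∘ (fun k => ((k : Nat) : Int)))).sum =
        ∑ j ∈ Finset.range (mat.length - 1), (mat.getD i []).getD j 0 := by
      rw [← sum_range_list]
      apply congrArg
      apply List.map_congr_left
      intro j _
      simp only [Function.comp]
      exact PySem.List.pyGetD_natCast _ _ _
    rw [e2]
    unfold Rrow
    rw [show ∑ j ∈ Finset.range (mat.length - 1),
        (if (0 : Nat).testBit j then (mat.getD i []).getD j 0 else -(mat.getD i []).getD j 0) =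
        ∑ j ∈ Finset.range (mat.length - 1), -((mat.getD i []).getD j 0) from
      Finset.sum_congr rfl (fun j _ => by simp [Nat.zero_testBit])]
    rw [Finset.sum_neg_distrib]
    ring
  rw [hgc, hrs, multiprod_rowsL mat (by intro h; rw [h] at hne; simp at hne) mat.length 0,
    shiftLeft_one_eq]
  rw [A_loop mat mat.length rfl h1 (2 ^ (mat.length - 1)) Nat.one_le_two_pow (le_refl _)]

theorem AB_eq (mat : List (List Int)) : permanent_ryser_gray mat = permanent_ryser_gray_alt mat := by
  by_cases h : mat.length = 0
  · match mat, h with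
    | [], _ => rfl
  · rw [A_eq mat h, B_eq mat h, sum_reindex mat mat.length _ rfl]
    congr 1
    have hc : ((mat.length : Int) - 1) = (((mat.length - 1 : Nat) : Nat) : Int) := by omega
    unfold dosign
    by_cases h2 : (mat.length - 1) % 2 = 1
    · rw [if_pos h2, if_pos (by rw [hc]; exact decide_eq_true ((band_one_ne _).mpr h2))]
    · rw [if_neg h2, if_neg (by
        rw [hc, decide_eq_false (fun hco => by have := (band_one_ne (mat.length - 1)).mp hco; omega)]
        simp)]

-- ===== VERDICT (by name: the statement is the Claim_ definition above) =====
theorem permanent_ryser_gray_spec : Claim_equal_permanent_ryser_gray := by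
  intro mat _ _
  unfold Spec_permanent_ryser_gray
  exact AB_eq mat
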